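-- pv_equiv track=rewrite | github.com/AjithKutty/Tesu-tournament | src/parse_web.py | round_names_for_size
-- ===== SOURCE A (Python) =====
-- import math
--
-- def round_names_for_size(draw_size):
--     """Derive round name sequence from draw size."""
--     num_rounds = int(math.log2(draw_size)) if draw_size > 0 else 0
--     names = []
--     for i in range(num_rounds):
--         remaining = num_rounds - i
--         if remaining == 1:
--             names.append("Final")
--         elif remaining == 2:
--             names.append("Semi-Final")
--         elif remaining == 3:
--             names.append("Quarter-Final")
--         else:
--             names.append(f"Round {i + 1}")
--     return names
-- ===== SOURCE B (Python) =====
-- import math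
--
-- def round_names_for_size(draw_size):
--     """Derive round name sequence from draw size."""
--     num_rounds = int(math.log2(draw_size)) if draw_size > 0 else 0
--     tail = ["Quarter-Final", "Semi-Final", "Final"]
--     return ["Round %d" % (i + 1) for i in range(num_rounds - 3)] + tail[max(0, 3 - num_rounds):]
-- ===== Notes on version B (the rewrite author's own statement) =====
-- stated objective: simpler
-- what changed: Replaced the per-element per-element last-rounds branch loop by a two-phase build: a generic 'Round i' prefix comprehension plus a sliced fixed tail ['Quarter-Final','Semi-Final','Final'].
import Mathlib
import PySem

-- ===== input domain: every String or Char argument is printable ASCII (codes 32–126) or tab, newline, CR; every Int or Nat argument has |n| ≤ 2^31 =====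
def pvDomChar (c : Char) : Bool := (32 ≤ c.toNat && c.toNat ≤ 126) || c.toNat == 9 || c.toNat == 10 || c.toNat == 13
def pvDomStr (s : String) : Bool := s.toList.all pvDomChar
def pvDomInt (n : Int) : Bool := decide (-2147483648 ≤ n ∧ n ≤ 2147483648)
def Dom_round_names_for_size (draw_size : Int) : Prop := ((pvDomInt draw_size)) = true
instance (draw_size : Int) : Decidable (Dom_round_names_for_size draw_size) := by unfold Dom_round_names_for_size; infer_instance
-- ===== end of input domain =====

-- B replaces A's per-element per-element last-rounds branch loop by a generic "Round i" prefix plus a sliced fixed tail (simpler decomposition).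
-- int(math.log2(d)) for 0 < d ≤ 2^31 is exactly floor(log2 d) = Nat.log 2 d (checked against CPython on the domain).

-- ===== PORT A =====
def round_names_for_size (draw_size : Int) : List String :=
  let numRounds : Nat := if draw_size > 0 then Nat.log 2 draw_size.toNat else 0
  (List.range numRounds).foldl (fun names i =>
    let remaining := numRounds - i
    if remaining = 1 then names ++ ["Final"]
    else if remaining = 2 then names ++ ["Semi-Final"]
    else if remaining = 3 then names ++ ["Quarter-Final"]
    else names ++ ["Round " ++ PySem.Int.toStr ((i : Int) + 1)]) []

-- ===== PORT B =====
-- tail[max(0, 3 - n):] on the 3-element tail is List.drop (3 - n) with Nat truncated subtraction (= max 0 (3-n)).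
def round_names_for_size_alt (draw_size : Int) : List String :=
  let numRounds : Nat := if draw_size > 0 then Nat.log 2 draw_size.toNat else 0
  ((List.range (numRounds - 3)).map (fun (i : Nat) => "Round " ++ PySem.Int.toStr ((i : Int) + 1)))
    ++ (["Quarter-Final", "Semi-Final", "Final"].drop (3 - numRounds))

-- ===== PRECONDITION & SPEC =====
def Spec_round_names_for_size (draw_size : Int) (out : List String) : Prop := out = round_names_for_size_alt draw_size
instance (draw_size : Int) (out : List String) : Decidable (Spec_round_names_for_size draw_size out) := by unfold Spec_round_names_for_size; infer_instance

-- ===== CLAIM (what is proved, stated in full; the proofs are below) =====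
def Claim_equal_round_names_for_size : Prop := ∀ (draw_size : Int), Dom_round_names_for_size draw_size → Spec_round_names_for_size draw_size (round_names_for_size draw_size)

-- ===== LEMMAS AND PROOFS =====

def pvName (n i : Nat) : String :=
  if n - i = 1 then "Final"
  else if n - i = 2 then "Semi-Final"
  else if n - i = 3 then "Quarter-Final"
  else "Round " ++ PySem.Int.toStr ((i : Int) + 1)

theorem pv_core (n : Nat) :
    (List.range n).map (pvName n)
      = ((List.range (n - 3)).map (fun (i : Nat) => "Round " ++ PySem.Int.toStr ((i : Int) + 1)))
        ++ (["Quarter-Final", "Semi-Final", "Final"].drop (3 - n)) := by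
  match n with
  | 0 => decide
  | 1 => decide
  | 2 => decide
  | 3 => decide
  | (m + 4) =>
    have h1 : m + 4 = (m + 3) + 1 := rfl
    have h2 : m + 3 = (m + 2) + 1 := rfl
    have h3 : m + 2 = (m + 1) + 1 := rfl
    rw [h1, List.range_succ, h2, List.range_succ, h3, List.range_succ]
    simp only [List.map_append, List.map_cons, List.map_nil]
    have hd : (3 : Nat) - (m + 4) = 0 := by omega
    rw [hd]
    simp only [List.drop_zero]
    have hpre : ∀ i ∈ List.range (m + 1), pvName (m + 4) i
        = "Round " ++ PySem.Int.toStr ((i : Int) + 1) := by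
      intro i hi
      have : i < m + 1 := List.mem_range.mp hi
      unfold pvName
      have e1 : m + 4 - i ≠ 1 := by omega
      have e2 : m + 4 - i ≠ 2 := by omega
      have e3 : m + 4 - i ≠ 3 := by omega
      simp [e1, e2, e3]
    rw [List.map_congr_left hpre]
    have hn : m + 4 - 3 = m + 1 := by omega
    rw [hn]
    have q : pvName (m + 4) (m + 1) = "Quarter-Final" := by unfold pvName; simp
    have s : pvName (m + 4) (m + 2) = "Semi-Final" := by unfold pvName; simp
    have f : pvName (m + 4) (m + 3) = "Final" := by unfold pvName; simp
    rw [q, s, f]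
    simp

theorem round_names_body (n : Nat) :
    (List.range n).foldl (fun names i =>
      let remaining := n - i
      if remaining = 1 then names ++ ["Final"]
      else if remaining = 2 then names ++ ["Semi-Final"]
      else if remaining = 3 then names ++ ["Quarter-Final"]
      else names ++ ["Round " ++ PySem.Int.toStr ((i : Int) + 1)]) []
    = (List.range n).map (pvName n) := by
  have hf : (fun (names : List String) (i : Nat) =>
      let remaining := n - i
      if remaining = 1 then names ++ ["Final"]
      else if remaining = 2 then names ++ ["Semi-Final"]
      else if remaining = 3 then names ++ ["Quarter-Final"]
      else names ++ ["Round " ++ PySem.Int.toStr ((i : Int) + 1)])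
      = (fun names i => names ++ [pvName n i]) := by
    funext names i
    unfold pvName
    simp only []
    split_ifs <;> rfl
  rw [hf, PySem.List.foldl_append_singleton_eq_map]
  simp

-- ===== VERDICT (by name: the statement is the Claim_ definition above) =====
theorem round_names_for_size_spec : Claim_equal_round_names_for_size := by
  intro d _
  unfold Spec_round_names_for_size round_names_for_size round_names_for_size_alt
  simp only []
  rw [round_names_body, pv_core]
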